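-- pv_equiv track=rewrite | github.com/wspr-ncsu/urlparsing-framework | test/python-parsers.py | break_urllib
-- ===== SOURCE A (Python) =====
-- def break_urllib(parsed):
-- 	keys = ['scheme', 'user', 'password', 'host', 'port', 'path', 'query', 'fragment']
-- 	res = {}
-- 	for i in range(len(keys)):
-- 		if i < len(parsed):
-- 			res[keys[i]] = parsed[i] if parsed[i] != None else ''
-- 		else:
-- 			res[keys[i]] = ''
-- 	return res
-- ===== SOURCE B (Python) =====
-- def break_urllib(parsed):
-- 	keys = ['scheme', 'user', 'password', 'host', 'port', 'path', 'query', 'fragment']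
-- 	def go(ks, ps):
-- 		if not ks:
-- 			return {}
-- 		head = {ks[0]: ps[0] if ps and ps[0] is not None else ''}
-- 		head.update(go(ks[1:], ps[1:]))
-- 		return head
-- 	return go(keys, parsed)
-- ===== Notes on version B (the rewrite author's own statement) =====
-- stated objective: alternative
-- what changed: Replaces A's single index-guarded loop over range(len(keys)) with indexing into two lists by a structural recursion on the key list that consumes parsed in parallel: each call builds a one-entry dict for the head key (None/missing -> '') and merges the recursively built tail dict into it.
import Mathlib
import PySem

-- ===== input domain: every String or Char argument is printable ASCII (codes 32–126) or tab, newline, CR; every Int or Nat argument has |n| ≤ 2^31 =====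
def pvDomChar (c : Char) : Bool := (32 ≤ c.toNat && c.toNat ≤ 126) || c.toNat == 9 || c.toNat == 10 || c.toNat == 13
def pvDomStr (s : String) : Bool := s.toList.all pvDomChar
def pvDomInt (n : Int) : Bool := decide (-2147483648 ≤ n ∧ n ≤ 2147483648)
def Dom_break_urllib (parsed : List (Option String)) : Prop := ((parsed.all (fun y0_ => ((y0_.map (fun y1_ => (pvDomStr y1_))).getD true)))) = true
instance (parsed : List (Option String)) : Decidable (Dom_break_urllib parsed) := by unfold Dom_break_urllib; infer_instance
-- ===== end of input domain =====

-- B builds the result by structural recursion on the key list, consuming parsed in parallel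
-- (head entry with None/missing -> '', then merging the recursively built tail dict),
-- instead of A's index-guarded loop over range(len(keys)); objective: alternative decomposition.


-- ===== PORT A =====
def break_urllib (parsed : List (Option String)) : List (String × String) :=
  let keys : List String := ["scheme", "user", "password", "host", "port", "path", "query", "fragment"]
  let res : PySem.Dict String String :=
    (PySem.List.pyRange 0 (keys.length : Int) 1).foldl (fun res i =>
      if i < (parsed.length : Int) then
        -- res[keys[i]] = parsed[i] if parsed[i] != None else ''  (indices provably in range)
        res.insert (PySem.List.pyGetD keys i "")
          (match PySem.List.pyGetD parsed i none with
           | some v => v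
           | none => "")
      else
        res.insert (PySem.List.pyGetD keys i "") "") PySem.Dict.empty
  res.items

-- ===== PORT B =====
-- go(ks, ps): head dict {ks[0]: v}, then head.update(go(ks[1:], ps[1:]))
def pvGoB (ks : List String) (ps : List (Option String)) : PySem.Dict String String :=
  match ks with
  | [] => PySem.Dict.empty
  | k :: ks' =>
    let v : String :=
      match ps with
      | [] => ""                       -- 'ps and ps[0] is not None' fails on empty ps
      | p :: _ => p.getD ""            -- ps[0] if not None else ''
    let head := PySem.Dict.ofList [(k, v)]
    PySem.Dict.update head (pvGoB ks' (PySem.List.slice ps (some 1) none)).items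

def break_urllib_alt (parsed : List (Option String)) : List (String × String) :=
  let keys : List String := ["scheme", "user", "password", "host", "port", "path", "query", "fragment"]
  (pvGoB keys parsed).items

-- ===== PRECONDITION & SPEC =====
def Spec_break_urllib (parsed : List (Option String)) (out : List (String × String)) : Prop := out = break_urllib_alt parsed
instance (parsed : List (Option String)) (out : List (String × String)) : Decidable (Spec_break_urllib parsed out) := by unfold Spec_break_urllib; infer_instance

-- ===== CLAIM (what is proved, stated in full; the proofs are below) =====
def Claim_equal_break_urllib : Prop := ∀ (parsed : List (Option String)), Dom_break_urllib parsed → Spec_break_urllib parsed (break_urllib parsed)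

-- ===== LEMMAS AND PROOFS =====

def pvKeys : List String := ["scheme", "user", "password", "host", "port", "path", "query", "fragment"]

theorem pvKeys_nodup : pvKeys.Nodup := by decide

-- fst-projection of a zip
theorem map_fst_zip_eq_take {α β : Type} (l1 : List α) (l2 : List β) :
    (l1.zip l2).map Prod.fst = l1.take l2.length := by
  induction l1 generalizing l2 with
  | nil => simp
  | cons a l1 ih =>
    cases l2 with
    | nil => simp
    | cons b l2 => simp [ih]

-- A's items, via the fresh-key insertion loop
theorem itemsA (parsed : List (Option String)) :
    break_urllib parsed =
      (List.range pvKeys.length).map (fun j =>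
        (pvKeys.getD j "", if j < parsed.length then (parsed.getD j none).getD "" else "")) := by
  simp only [break_urllib]
  rw [show (["scheme", "user", "password", "host", "port", "path", "query", "fragment"] : List String) = pvKeys from rfl]
  have hbody : (fun (res : PySem.Dict String String) (i : Int) =>
      if i < (parsed.length : Int) then
        res.insert (PySem.List.pyGetD pvKeys i "")
          (match PySem.List.pyGetD parsed i none with
           | some v => v
           | none => "")
      else
        res.insert (PySem.List.pyGetD pvKeys i "") "") =
      (fun res i => res.insert (PySem.List.pyGetD pvKeys i "")
        (if i < (parsed.length : Int) then (PySem.List.pyGetD parsed i none).getD "" else "")) := by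
    funext res i
    by_cases h : i < (parsed.length : Int)
    · simp only [if_pos h]
      congr 1
      cases PySem.List.pyGetD parsed i none <;> rfl
    · simp only [if_neg h]
  rw [hbody]
  rw [PySem.Dict.items_foldl_insert_fresh _ _ _ _ (by intro a _; exact PySem.Dict.contains_empty _)
      (by decide)]
  simp only [PySem.Dict.empty, List.nil_append]
  rw [PySem.List.pyRange_zero_nat, List.map_map]
  refine List.map_congr_left ?_
  intro j hj
  simp [Function.comp, PySem.List.pyGetD_natCast]

-- merging a dict with fresh distinct keys into a one-entry dict conses its items
theorem items_update_single (k : String) (v : String) (d : PySem.Dict String String)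
    (h1 : ∀ a ∈ d.items, (a.1 == k) = false)
    (h2 : (d.items.map Prod.fst).Nodup) :
    (PySem.Dict.update (PySem.Dict.ofList [(k, v)]) d.items).items = (k, v) :: d.items := by
  rw [show PySem.Dict.update (PySem.Dict.ofList [(k, v)]) d.items =
      d.items.foldl (fun d p => d.insert p.1 p.2) (PySem.Dict.ofList [(k, v)]) from rfl]
  rw [PySem.Dict.items_foldl_insert_fresh _ _ _ _
      (by
        intro a ha
        rw [show (PySem.Dict.ofList [(k, v)]) =
            (PySem.Dict.empty : PySem.Dict String String).insert k v from rfl,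
          PySem.Dict.contains_insert, h1 a ha, PySem.Dict.contains_empty, Bool.or_false])
      h2]
  rw [show ((PySem.Dict.ofList [(k, v)] : PySem.Dict String String)).items = [(k, v)] from rfl]
  simp

-- B's items: recursion on the keys, consuming parsed in parallel
theorem itemsGoB (ks : List String) (ps : List (Option String)) (hnd : ks.Nodup) :
    (pvGoB ks ps).items =
      (ks.zip ps).map (fun kv => (kv.1, kv.2.getD "")) ++
      (ks.drop ps.length).map (fun k => (k, "")) := by
  induction ks generalizing ps with
  | nil => simp [pvGoB, PySem.Dict.empty]
  | cons k ks' ih =>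
    have hk : k ∉ ks' := (List.nodup_cons.mp hnd).1
    have hnd' : ks'.Nodup := (List.nodup_cons.mp hnd).2
    have hsl : PySem.List.slice ps (some 1) none = ps.drop 1 := by
      have := PySem.List.slice_from_natCast ps 1
      simpa using this
    -- items of the recursive call
    have hIH := ih (ps.drop 1) hnd'
    -- its first components are exactly ks'
    have hfst : ((pvGoB ks' (ps.drop 1)).items).map Prod.fst = ks' := by
      rw [hIH, List.map_append, List.map_map, List.map_map]
      have h1 : ((ks'.zip (ps.drop 1)).map (Prod.fst ∘ fun kv => (kv.1, kv.2.getD ""))) =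
          ks'.take (ps.drop 1).length := by
        rw [show (Prod.fst ∘ fun kv : String × Option String => (kv.1, kv.2.getD "")) = Prod.fst from rfl]
        exact map_fst_zip_eq_take _ _
      have h2 : ((ks'.drop (ps.drop 1).length).map (Prod.fst ∘ fun k => (k, ""))) =
          ks'.drop (ps.drop 1).length := by
        rw [show (Prod.fst ∘ fun k : String => (k, "")) = id from rfl, List.map_id]
      rw [h1, h2, List.take_append_drop]
    simp only [pvGoB, hsl]
    rw [items_update_single _ _ _
        (by
          intro a ha
          have hmem : a.1 ∈ ks' := by
            rw [← hfst]; exact List.mem_map_of_mem ha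
          simp only [beq_eq_false_iff_ne]
          intro h; exact hk (h ▸ hmem))
        (by rw [hfst]; exact hnd')]
    rw [hIH]
    cases ps with
    | nil => simp
    | cons p ps' => simp

-- the two item lists coincide, for any key list
theorem range_map_eq_zip_append {α : Type} (ks : List α) (ps : List (Option String)) (dflt : α) :
    (List.range ks.length).map (fun j =>
        (ks.getD j dflt, if j < ps.length then (ps.getD j none).getD "" else "")) =
      (ks.zip ps).map (fun kv => (kv.1, kv.2.getD "")) ++
      (ks.drop ps.length).map (fun k => (k, "")) := by
  induction ks generalizing ps with
  | nil => simp
  | cons k ks ih =>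
    cases ps with
    | nil =>
      rw [List.length_cons, List.range_succ_eq_map, List.map_cons, List.map_map]
      rw [show (List.zip (k :: ks) ([] : List (Option String))) = [] from by simp]
      rw [List.map_nil, List.nil_append, List.length_nil, List.drop_zero, List.map_cons,
        List.cons_eq_cons]
      refine ⟨by simp, ?_⟩
      have h := ih []
      simp only [List.zip_nil_right, List.map_nil, List.nil_append, List.length_nil,
        List.drop_zero] at h
      rw [← h]
      exact List.map_congr_left (fun j hj => by simp [Function.comp])
    | cons p ps =>
      rw [show (k :: ks).length = ks.length + 1 from rfl, List.range_succ_eq_map, List.map_cons,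
        List.map_map, List.zip_cons_cons, List.map_cons,
        show (p :: ps).length = ps.length + 1 from rfl, List.drop_succ_cons, List.cons_append,
        List.cons_eq_cons]
      refine ⟨by simp, ?_⟩
      rw [← ih ps]
      exact List.map_congr_left (fun j hj => by simp [Function.comp])

-- ===== VERDICT (by name: the statement is the Claim_ definition above) =====
theorem break_urllib_spec : Claim_equal_break_urllib := by
  intro parsed _
  unfold Spec_break_urllib
  rw [itemsA, range_map_eq_zip_append]
  rw [show break_urllib_alt parsed = (pvGoB pvKeys parsed).items from rfl,
    itemsGoB _ _ pvKeys_nodup]
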